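-- pv_equiv track=rewrite | github.com/felixdelbarrio/nps_lens_app | src/nps_lens/analytics/incident_attribution.py | _dedupe_executive_journey_catalog
-- ===== SOURCE A (Python) =====
-- def _dedupe_executive_journey_catalog(
--     rows: list[dict[str, object]],
-- ) -> list[dict[str, object]]:
--     seen: dict[str, int] = {}
--     out: list[dict[str, object]] = []
--     for row in rows:
--         key = str(row.get("id") or "").strip().lower()
--         seen[key] = seen.get(key, 0) + 1
--         if seen[key] > 1:
--             row = dict(row)
--             row["id"] = f"{key}-{seen[key]:02d}"
--         out.append(row)
--     return out
-- ===== SOURCE B (Python) =====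
-- def _dedupe_executive_journey_catalog(
--     rows: list[dict[str, object]],
-- ) -> list[dict[str, object]]:
--     out = list(rows)
--     groups: dict[str, list[int]] = {}
--     for idx, row in enumerate(rows):
--         key = str(row.get("id") or "").strip().lower()
--         groups.setdefault(key, []).append(idx)
--     for key, positions in groups.items():
--         for n, idx in enumerate(positions[1:], start=2):
--             out[idx] = {**rows[idx], "id": f"{key}-{n:02d}"}
--     return out
-- ===== Notes on version B (the rewrite author's own statement) =====
-- stated objective: alternative
-- what changed: Replaces A's single stateful pass with a running 'seen' counter by a two-phase scatter: first build an index mapping each normalized key to the list of positions where it occurs, then start from out = list(rows) and overwrite only the duplicate positions (every occurrence after the first in its group) with a copied row carrying the ordinal-suffixed id; first occurrences remain the original objects.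
import Mathlib
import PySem

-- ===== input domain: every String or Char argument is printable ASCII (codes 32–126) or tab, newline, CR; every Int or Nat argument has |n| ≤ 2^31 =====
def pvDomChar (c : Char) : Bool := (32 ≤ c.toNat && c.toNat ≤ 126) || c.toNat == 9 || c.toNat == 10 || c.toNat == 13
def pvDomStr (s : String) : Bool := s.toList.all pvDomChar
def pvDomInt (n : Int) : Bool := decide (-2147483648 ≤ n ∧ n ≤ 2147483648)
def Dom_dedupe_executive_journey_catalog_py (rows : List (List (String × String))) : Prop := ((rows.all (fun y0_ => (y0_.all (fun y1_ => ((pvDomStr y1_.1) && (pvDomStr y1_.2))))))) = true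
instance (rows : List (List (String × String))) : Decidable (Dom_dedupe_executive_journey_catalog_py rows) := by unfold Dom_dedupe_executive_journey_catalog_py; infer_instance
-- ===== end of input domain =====

-- B replaces A's single stateful pass (a running 'seen' counter dict) by a two-phase scatter:
-- build an index key -> positions, then overwrite only the duplicate positions of out = list(rows)
-- (objective: alternative).

-- ===== PORT A =====
-- key = str(row.get("id") or "").strip().lower()   ('or ""' only maps a missing/empty value
-- to "", which getD "id" "" already does, since values are strings)
def pvKey (row : List (String × String)) : String :=
  PySem.Str.lower (PySem.Str.strip ((PySem.Dict.mk row).getD "id" ""))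

-- f"{n:02d}" (exact for the values that occur here: zero-pads a nonnegative int to width 2)
def pvPad2 (n : Int) : String :=
  let cs := PySem.Int.toChars n
  if cs.length < 2 then String.ofList ('0' :: cs) else String.ofList cs

-- row = dict(row); row["id"] = v   (overwrite keeps position, append if absent)
def pvSetId (row : List (String × String)) (v : String) : List (String × String) :=
  ((PySem.Dict.mk row).insert "id" v).items

-- loop body of A
def pvStepA (st : PySem.Dict String Int × List (List (String × String)))
    (row : List (String × String)) :
    PySem.Dict String Int × List (List (String × String)) :=
  let key := pvKey row
  let seen := st.1.insert key (st.1.getD key 0 + 1)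
  if seen.getD key 0 > 1 then
    (seen, st.2 ++ [pvSetId row (key ++ "-" ++ pvPad2 (seen.getD key 0))])
  else
    (seen, st.2 ++ [row])

def dedupe_executive_journey_catalog_py (rows : List (List (String × String))) : List (List (String × String)) :=
  (rows.foldl pvStepA ((PySem.Dict.empty : PySem.Dict String Int), [])).2

-- ===== PORT B =====
-- first loop: groups.setdefault(key, []).append(idx)  ==  groups[key] = groups.get(key, []) + [idx]
def pvGroups (rows : List (List (String × String))) : PySem.Dict String (List Int) :=
  (PySem.List.enumerate rows).foldl
    (fun g p => g.modify (pvKey p.2) [] (· ++ [p.1])) PySem.Dict.empty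

-- inner loop of the second pass: for n, idx in enumerate(positions[1:], start=2): out[idx] = {**rows[idx], "id": f"{key}-{n:02d}"}
-- (out[idx] = … : every idx is a valid position of out, so the total pySetD is exact here)
def pvWrite (rows : List (List (String × String))) (out : List (List (String × String)))
    (kp : String × List Int) : List (List (String × String)) :=
  (PySem.List.enumerate (PySem.List.slice kp.2 (some 1) none) 2).foldl
    (fun out q =>
      PySem.List.pySetD out q.2
        (pvSetId (PySem.List.pyGetD rows q.2 []) (kp.1 ++ "-" ++ pvPad2 q.1))) out

def dedupe_executive_journey_catalog_py_alt (rows : List (List (String × String))) : List (List (String × String)) :=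
  let out := rows
  let groups := pvGroups rows
  groups.items.foldl (pvWrite rows) out

-- ===== PRECONDITION & SPEC =====
def Spec_dedupe_executive_journey_catalog_py (rows : List (List (String × String))) (out : List (List (String × String))) : Prop := out = dedupe_executive_journey_catalog_py_alt rows
instance (rows : List (List (String × String))) (out : List (List (String × String))) : Decidable (Spec_dedupe_executive_journey_catalog_py rows out) := by unfold Spec_dedupe_executive_journey_catalog_py; infer_instance

-- ===== CLAIM (what is proved, stated in full; the proofs are below) =====
def Claim_equal_dedupe_executive_journey_catalog_py : Prop := ∀ (rows : List (List (String × String))), Dom_dedupe_executive_journey_catalog_py rows → Spec_dedupe_executive_journey_catalog_py rows (dedupe_executive_journey_catalog_py rows)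

-- ===== LEMMAS AND PROOFS =====

-- common reference: out-row at a position whose key-prefix (strictly before it) is bs
def pvRefStep (bs : List String) (row : List (String × String)) : List (String × String) :=
  if bs.count (pvKey row) = 0 then row
  else pvSetId row (pvKey row ++ "-" ++ pvPad2 ((bs.count (pvKey row) : Int) + 1))

-- ----- A-side: the loop equals a structural build, characterised pointwise -----
def pvBuild (bs : List String) : List (List (String × String)) → List (List (String × String))
  | [] => []
  | row :: rest => pvRefStep bs row :: pvBuild (bs ++ [pvKey row]) rest

lemma pvA_aux (rows : List (List (String × String))) :
    ∀ (d : PySem.Dict String Int) (acc : List (List (String × String))) (bs : List String),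
      (∀ k, d.getD k 0 = (bs.count k : Int)) →
      (rows.foldl pvStepA (d, acc)).2 = acc ++ pvBuild bs rows := by
  induction rows with
  | nil => intro d acc bs _; simp [pvBuild]
  | cons row rest ih =>
    intro d acc bs hinv
    have hkey : (d.insert (pvKey row) (d.getD (pvKey row) 0 + 1)).getD (pvKey row) 0
        = (bs.count (pvKey row) : Int) + 1 := by
      rw [PySem.Dict.getD_insert_self, hinv]
    have hinv' : ∀ k, (d.insert (pvKey row) (d.getD (pvKey row) 0 + 1)).getD k 0
        = ((bs ++ [pvKey row]).count k : Int) := by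
      intro k
      rw [PySem.Dict.getD_insert]
      by_cases hk : k = pvKey row
      · subst hk; simp [hinv]
      · simp [hk, hinv, List.count_append, Ne.symm hk]
    simp only [List.foldl_cons]
    rw [show pvStepA (d, acc) row =
        (d.insert (pvKey row) (d.getD (pvKey row) 0 + 1), acc ++ [pvRefStep bs row]) from by
      simp only [pvStepA, hkey, pvRefStep]
      by_cases h0 : bs.count (pvKey row) = 0
      · simp [h0]
      · rw [if_pos (by omega : ((bs.count (pvKey row) : Int) + 1) > 1),
            if_neg (by omega : ¬ (bs.count (pvKey row) = 0))]]
    rw [ih _ _ _ hinv']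
    simp [pvBuild]

lemma pvBuild_length (l : List (List (String × String))) :
    ∀ bs, (pvBuild bs l).length = l.length := by
  induction l with
  | nil => intro bs; simp [pvBuild]
  | cons row rest ih => intro bs; simp [pvBuild, ih]

lemma pvBuild_getElem? (l : List (List (String × String))) :
    ∀ (bs : List String) (i : Nat) (hi : i < l.length),
      (pvBuild bs l)[i]? = some (pvRefStep (bs ++ (l.map pvKey).take i) l[i]) := by
  induction l with
  | nil => intro bs i hi; simp at hi
  | cons row rest ih =>
    intro bs i hi
    cases i with
    | zero => simp [pvBuild]
    | succ j =>
      have hj : j < rest.length := by simpa using hi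
      simp only [pvBuild, List.getElem?_cons_succ, List.map_cons, List.take_succ_cons,
        List.getElem_cons_succ]
      rw [ih (bs ++ [pvKey row]) j hj]
      simp

-- ----- B-side -----
-- positions of key k among the row indices, in increasing order (Nat form)
def pvIdxs (rows : List (List (String × String))) (k : String) : List Nat :=
  (List.range rows.length).filter (fun j => (rows.map pvKey)[j]? == some k)

lemma pvGroupsAux (k : String) :
    ∀ (l : List (Int × List (String × String))) (d : PySem.Dict String (List Int)),
      (l.foldl (fun g p => g.modify (pvKey p.2) [] (· ++ [p.1])) d).getD k []
        = d.getD k [] ++ (l.filter (fun p => pvKey p.2 == k)).map (·.1) := by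
  intro l
  induction l with
  | nil => intro d; simp
  | cons p l' ih =>
    intro d
    simp only [List.foldl_cons]
    rw [ih]
    by_cases hk : pvKey p.2 = k
    · rw [List.filter_cons_of_pos (by simp [hk]), PySem.Dict.getD_modify,
        if_pos hk.symm, hk]
      simp
    · rw [List.filter_cons_of_neg (by simp [hk]), PySem.Dict.getD_modify,
        if_neg (fun h => hk h.symm)]

lemma pvGroups_getD (rows : List (List (String × String))) (k : String) :
    (pvGroups rows).getD k [] = (pvIdxs rows k).map (fun (j : Nat) => (j : Int)) := by
  unfold pvGroups
  rw [pvGroupsAux, PySem.Dict.getD_empty, List.nil_append]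
  rw [PySem.List.enumerate_eq_map_pyRange rows [],
      show PySem.List.len rows = ((rows.length : Nat) : Int) from rfl,
      PySem.List.pyRange_zero_natCast, List.map_map, List.filter_map, List.map_map]
  unfold pvIdxs
  rw [List.filter_congr (l := List.range rows.length)
      (q := fun j => (rows.map pvKey)[j]? == some k) ?_]
  · rfl
  · intro j hj
    have hjlt : j < rows.length := List.mem_range.mp hj
    simp [Function.comp, PySem.List.pyGetD_natCast, List.getD_eq_getElem?_getD,
      List.getElem?_eq_getElem hjlt, pvKey]

lemma pvGroups_keys (rows : List (List (String × String))) :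
    (pvGroups rows).keys = PySem.Set.ofList (rows.map pvKey) := by
  unfold pvGroups
  rw [PySem.Dict.keys_foldl_modify_key (PySem.List.enumerate rows) (fun p => pvKey p.2) []
      (fun _ p => (· ++ [p.1])) PySem.Dict.empty]
  rw [show PySem.Dict.keys (PySem.Dict.empty) = ([] : List String) from rfl,
      PySem.Set.update_nil_left]
  congr 1
  rw [show (fun (p : Int × List (String × String)) => pvKey p.2)
      = pvKey ∘ (fun p => p.2) from rfl, ← List.map_map, PySem.List.map_snd_enumerate]

lemma pvGroups_nodup (rows : List (List (String × String))) :
    (pvGroups rows).keys.Nodup := by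
  unfold pvGroups
  exact PySem.Dict.nodup_keys_foldl_modify_key _ _ _ _ _ PySem.Dict.nodup_keys_empty

-- prefix-count of a key = number of earlier positions holding it
lemma pvCount_filter (keys : List String) (k : String) :
    ∀ j, j ≤ keys.length →
      (keys.take j).count k
        = ((List.range j).filter (fun j' => keys[j']? == some k)).length := by
  intro j
  induction j with
  | zero => intro _; simp
  | succ m ih =>
    intro hm
    have hmlt : m < keys.length := by omega
    rw [List.take_add_one, List.range_succ, List.filter_append, List.count_append,
      ih (by omega)]
    by_cases hk : keys[m] = k
    · simp [List.getElem?_eq_getElem hmlt, hk]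
    · simp [List.getElem?_eq_getElem hmlt, hk]

lemma pvIdxs_mem (rows : List (List (String × String))) (k : String) (j : Nat) :
    j ∈ pvIdxs rows k ↔ j < rows.length ∧ (rows.map pvKey)[j]? = some k := by
  simp [pvIdxs, List.mem_filter, List.mem_range]

lemma pvIdxs_nodup (rows : List (List (String × String))) (k : String) :
    (pvIdxs rows k).Nodup := by
  exact List.Nodup.filter _ (List.nodup_range)

-- position of j within its group = count of its key strictly before j
lemma pvIdxs_getElem? (rows : List (List (String × String))) (k : String) (j : Nat)
    (hj : j < rows.length) (hk : (rows.map pvKey)[j]? = some k) :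
    (pvIdxs rows k)[((rows.map pvKey).take j).count k]? = some j := by
  have hlen : (rows.map pvKey).length = rows.length := List.length_map ..
  rw [pvCount_filter (rows.map pvKey) k j (by omega)]
  unfold pvIdxs
  have hsplit : List.range rows.length
      = List.range j ++ (List.range (rows.length - j)).map (fun x => j + x) := by
    rw [← List.range_add]; congr 1; omega
  have hsplit2 : rows.length - j = (rows.length - j - 1) + 1 := by omega
  rw [hsplit, hsplit2, List.range_succ_eq_map, List.filter_append]
  rw [List.getElem?_append_right (le_refl _)]
  simp only [List.map_cons, Nat.add_zero, List.map_map]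
  rw [show List.filter (fun j' => (rows.map pvKey)[j']? == some k)
        (j :: List.map ((fun x => j + x) ∘ Nat.succ) (List.range (rows.length - j - 1)))
      = j :: List.filter (fun j' => (rows.map pvKey)[j']? == some k)
        (List.map ((fun x => j + x) ∘ Nat.succ) (List.range (rows.length - j - 1))) from by
    rw [List.filter_cons_of_pos (by simp [hk])]]
  simp

-- generic scatter lemma: a fold of in-range writes at pairwise-distinct indices, read pointwise
lemma pvFoldSet {alpha : Type} (f : Int × Int → alpha) :
    ∀ (ws : List (Int × Int)) (out : List alpha),
      (∀ q ∈ ws, 0 ≤ q.2 ∧ q.2.toNat < out.length) → (ws.map (·.2)).Nodup →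
      ∀ i : Nat,
        (ws.foldl (fun o q => PySem.List.pySetD o q.2 (f q)) out)[i]? =
          (match ws.find? (fun q => q.2 == (i : Int)) with
           | some q => some (f q)
           | none => out[i]?) := by
  intro ws
  induction ws with
  | nil => intro out _ _ i; simp
  | cons q ws' ih =>
    intro out hb hnd i
    have hbq := hb q (List.mem_cons_self ..)
    have hnd' : (ws'.map (·.2)).Nodup := (List.nodup_cons.mp hnd).2
    have hqn : q.2 ∉ ws'.map (·.2) := (List.nodup_cons.mp hnd).1
    have hset : PySem.List.pySetD out q.2 (f q) = out.set q.2.toNat (f q) :=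
      PySem.List.pySetD_of_nonneg out (f q) hbq.1
    have hlen1 : (PySem.List.pySetD out q.2 (f q)).length = out.length :=
      PySem.List.length_pySetD ..
    simp only [List.foldl_cons]
    rw [ih (PySem.List.pySetD out q.2 (f q))
        (fun r hr => by rw [hlen1]; exact hb r (List.mem_cons_of_mem _ hr)) hnd' i]
    by_cases hqi : (q.2 == (i : Int)) = true
    · have hq2 : q.2 = (i : Int) := by exact_mod_cast beq_iff_eq.mp hqi
      have hti : q.2.toNat = i := by omega
      have hfn : ws'.find? (fun r => r.2 == (i : Int)) = none := by
        rw [List.find?_eq_none]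
        intro r hr hri
        exact hqn (by rw [show q.2 = r.2 from by
          rw [hq2]; exact (beq_iff_eq.mp hri).symm]; exact List.mem_map_of_mem hr)
      rw [hfn, List.find?_cons, hqi]
      rw [hset, hti, List.getElem?_set_self (by omega)]
    · rw [List.find?_cons]
      have hqi' : (q.2 == (i : Int)) = false := by simpa using hqi
      rw [hqi']
      cases hf : ws'.find? (fun r => r.2 == (i : Int)) with
      | some r => simp
      | none =>
        simp only
        rw [hset, List.getElem?_set_ne (by
          intro hcon
          exact hqi (beq_iff_eq.mpr (by omega)))]

lemma pvFoldSet_length {alpha : Type} (f : Int × Int → alpha) :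
    ∀ (ws : List (Int × Int)) (out : List alpha),
      (ws.foldl (fun o q => PySem.List.pySetD o q.2 (f q)) out).length = out.length := by
  intro ws
  induction ws with
  | nil => intro out; rfl
  | cons q ws' ih =>
    intro out
    simp only [List.foldl_cons]
    rw [ih, PySem.List.length_pySetD]

lemma pvWrite_length (rows : List (List (String × String))) (out : List (List (String × String)))
    (kp : String × List Int) : (pvWrite rows out kp).length = out.length := by
  unfold pvWrite
  exact pvFoldSet_length _ _ _

-- find? over a snd-nodup list hits the recorded pair
lemma pvFind_snd : ∀ (ws : List (Int × Int)), (ws.map (·.2)).Nodup →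
    ∀ (a b : Int), (a, b) ∈ ws → ws.find? (fun q => q.2 == b) = some (a, b) := by
  intro ws
  induction ws with
  | nil => intro _ a b h; simp at h
  | cons q ws' ih =>
    intro hnd a b hmem
    have hnd' : (ws'.map (·.2)).Nodup := (List.nodup_cons.mp hnd).2
    have hqn : q.2 ∉ ws'.map (·.2) := (List.nodup_cons.mp hnd).1
    rw [List.find?_cons]
    by_cases hqb : (q.2 == b) = true
    · have hq2 : q.2 = b := beq_iff_eq.mp hqb
      rw [hqb]
      rcases List.mem_cons.mp hmem with h | h
      · rw [h]
      · exact absurd (by rw [hq2]; exact List.mem_map_of_mem h) hqn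
    · have hqb' : (q.2 == b) = false := by simpa using hqb
      rw [hqb']
      rcases List.mem_cons.mp hmem with h | h
      · exact absurd (beq_iff_eq.mpr (show q.2 = b from by rw [← h])) hqb
      · exact ih hnd' a b h

lemma pvMapTail (l : List Nat) :
    (l.map (fun (j : Nat) => (j : Int))).tail = l.tail.map (fun (j : Nat) => (j : Int)) := by
  cases l <;> rfl

lemma pvWrite_getElem? (rows : List (List (String × String))) (out : List (List (String × String)))
    (hlen : out.length = rows.length) (k : String) (i : Nat) (hi : i < rows.length) :
    (pvWrite rows out (k, (pvIdxs rows k).map (fun (j : Nat) => (j : Int))))[i]? =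
      (if (rows.map pvKey)[i]? = some k ∧ ((rows.map pvKey).take i).count k ≠ 0 then
        some (pvRefStep ((rows.map pvKey).take i) rows[i])
      else out[i]?) := by
  unfold pvWrite
  rw [show PySem.List.slice ((pvIdxs rows k).map (fun (j : Nat) => (j : Int))) (some 1) none
      = ((pvIdxs rows k).tail).map (fun (j : Nat) => (j : Int)) from by
    rw [PySem.List.slice_from_one, pvMapTail]]
  have hnodupt : ((pvIdxs rows k).tail).Nodup := (pvIdxs_nodup rows k).tail
  have hmem_tail : ∀ j ∈ (pvIdxs rows k).tail, j ∈ pvIdxs rows k := by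
    intro j hj; exact List.mem_of_mem_tail hj
  have hbnd : ∀ q ∈ PySem.List.enumerate (((pvIdxs rows k).tail).map (fun (j : Nat) => (j : Int))) 2,
      0 ≤ q.2 ∧ q.2.toNat < out.length := by
    intro q hq
    rcases (PySem.List.mem_enumerate_iff _ _ _).mp hq with ⟨m, hm, hqe⟩
    have hq2 : q.2 = ((((pvIdxs rows k).tail)[m]'(by simpa using hm) : Nat) : Int) := by
      rw [hqe]; simp
    rw [hq2]
    have hjm : (((pvIdxs rows k).tail)[m]'(by simpa using hm)) ∈ pvIdxs rows k :=
      hmem_tail _ (List.getElem_mem _)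
    have hmm := (pvIdxs_mem rows k _).mp hjm
    constructor
    · exact Int.natCast_nonneg _
    · rw [Int.toNat_natCast, hlen]; exact hmm.1
  have hndw : ((PySem.List.enumerate (((pvIdxs rows k).tail).map (fun (j : Nat) => (j : Int))) 2).map (·.2)).Nodup := by
    rw [PySem.List.map_snd_enumerate]
    exact hnodupt.map (fun a b h => by exact_mod_cast h)
  rw [pvFoldSet (fun q => pvSetId (PySem.List.pyGetD rows q.2 []) (k ++ "-" ++ pvPad2 q.1)) _ out
      hbnd hndw i]
  -- now analyse the find?
  by_cases hki : (rows.map pvKey)[i]? = some k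
  · by_cases hc : ((rows.map pvKey).take i).count k = 0
    · rw [if_neg (by simp [hc])]
      have hL0 : (pvIdxs rows k)[0]? = some i := by
        have := pvIdxs_getElem? rows k i hi hki
        rwa [hc] at this
      rw [show (PySem.List.enumerate (((pvIdxs rows k).tail).map (fun (j : Nat) => (j : Int))) 2).find?
            (fun q => q.2 == (i : Int)) = none from ?_]
      rw [List.find?_eq_none]
      intro q hq hqi
      rcases (PySem.List.mem_enumerate_iff _ _ _).mp hq with ⟨m, hm, hqe⟩
      have hq2 : q.2 = ((((pvIdxs rows k).tail)[m]'(by simpa using hm) : Nat) : Int) := by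
        rw [hqe]; simp
      have hji : (((pvIdxs rows k).tail)[m]'(by simpa using hm)) = i := by
        have := beq_iff_eq.mp hqi
        rw [hq2] at this
        exact_mod_cast this
      have hmt : m < (pvIdxs rows k).tail.length := by simpa using hm
      have hLm : (pvIdxs rows k)[m+1]? = some i := by
        have : ((pvIdxs rows k).tail)[m]? = some i := by
          rw [List.getElem?_eq_getElem hmt, hji]
        rwa [List.getElem?_tail] at this
      have h0lt : 0 < (pvIdxs rows k).length := by
        by_contra h
        rw [List.getElem?_eq_none (by omega)] at hL0
        simp at hL0
      have hm1lt : m + 1 < (pvIdxs rows k).length := by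
        by_contra h
        rw [List.getElem?_eq_none (by omega)] at hLm
        simp at hLm
      have : (0 : Nat) = m + 1 := by
        apply (List.Nodup.getElem_inj_iff (pvIdxs_nodup rows k)).mp
        rw [List.getElem?_eq_getElem h0lt] at hL0
        rw [List.getElem?_eq_getElem hm1lt] at hLm
        rw [Option.some_inj.mp hL0, Option.some_inj.mp hLm]
      omega
    · rw [if_pos ⟨hki, hc⟩]
      set c := ((rows.map pvKey).take i).count k with hcdef
      have hLc : (pvIdxs rows k)[c]? = some i := pvIdxs_getElem? rows k i hi hki
      have hc1 : c - 1 + 1 = c := by omega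
      have htc : ((pvIdxs rows k).tail)[c-1]? = some i := by
        rw [List.getElem?_tail, hc1]; exact hLc
      have hxc : (((pvIdxs rows k).tail).map (fun (j : Nat) => (j : Int)))[c-1]? = some ((i : Nat) : Int) := by
        rw [List.getElem?_map, htc]; rfl
      have hwc : (PySem.List.enumerate (((pvIdxs rows k).tail).map (fun (j : Nat) => (j : Int))) 2)[c-1]?
          = some ((2 + ((c-1 : Nat) : Int)), ((i : Nat) : Int)) := by
        rw [PySem.List.getElem?_enumerate, hxc]; rfl
      rw [pvFind_snd _ (by
          rw [PySem.List.map_snd_enumerate]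
          exact hnodupt.map (fun a b h => by exact_mod_cast h))
        _ _ (List.mem_of_getElem? hwc)]
      simp only
      have hval : PySem.List.pyGetD rows ((i : Nat) : Int) [] = rows[i] := by
        rw [PySem.List.pyGetD_natCast, List.getD_eq_getElem?_getD, List.getElem?_eq_getElem hi]
        rfl
      have hkk : pvKey rows[i] = k := by
        rw [List.getElem?_map, List.getElem?_eq_getElem hi] at hki
        exact Option.some_inj.mp hki
      have hpad : (2 + ((c-1 : Nat) : Int)) = ((c : Nat) : Int) + 1 := by
        have : (1 : Nat) ≤ c := by omega
        push_cast [Nat.cast_sub this]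
        ring
      rw [hval, hpad]
      unfold pvRefStep
      rw [if_neg (by rw [hkk]; exact hc), hkk]
  · rw [if_neg (by intro h; exact hki h.1)]
    rw [show (PySem.List.enumerate (((pvIdxs rows k).tail).map (fun (j : Nat) => (j : Int))) 2).find?
          (fun q => q.2 == (i : Int)) = none from ?_]
    rw [List.find?_eq_none]
    intro q hq hqi
    rcases (PySem.List.mem_enumerate_iff _ _ _).mp hq with ⟨m, hm, hqe⟩
    have hq2 : q.2 = ((((pvIdxs rows k).tail)[m]'(by simpa using hm) : Nat) : Int) := by
      rw [hqe]; simp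
    have hji : (((pvIdxs rows k).tail)[m]'(by simpa using hm)) = i := by
      have := beq_iff_eq.mp hqi
      rw [hq2] at this
      exact_mod_cast this
    have hjmem := (pvIdxs_mem rows k _).mp
      (hmem_tail _ (List.getElem_mem (l := (pvIdxs rows k).tail) (by simpa using hm)))
    rw [hji] at hjmem
    exact hki hjmem.2

lemma pvB_fold (rows : List (List (String × String))) :
    ∀ (ks : List String) (out : List (List (String × String))), out.length = rows.length →
      ∀ (i : Nat) (kki : String) (hi : i < rows.length), (rows.map pvKey)[i]? = some kki →
      (ks.foldl (fun o k => pvWrite rows o (k, (pvIdxs rows k).map (fun (j : Nat) => (j : Int)))) out)[i]? =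
        (if kki ∈ ks ∧ ((rows.map pvKey).take i).count kki ≠ 0 then
          some (pvRefStep ((rows.map pvKey).take i) rows[i])
        else out[i]?) := by
  intro ks
  induction ks with
  | nil => intro out _ i kki hi _; simp
  | cons k ks' ih =>
    intro out hlen i kki hi hkk
    simp only [List.foldl_cons]
    rw [ih (pvWrite rows out (k, (pvIdxs rows k).map (fun (j : Nat) => (j : Int))))
        (by rw [pvWrite_length]; exact hlen) i kki hi hkk]
    have hout1 := pvWrite_getElem? rows out hlen k i hi
    by_cases hc : ((rows.map pvKey).take i).count kki = 0
    · rw [if_neg (by simp [hc]), if_neg (by simp [hc]), hout1]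
      by_cases hk : kki = k
      · rw [if_neg (by rw [← hk]; simp [hc])]
      · rw [if_neg (by intro h; exact hk (by
          rw [hkk] at h; exact Option.some_inj.mp h.1))]
    · by_cases hmem : kki ∈ ks'
      · rw [if_pos ⟨hmem, hc⟩, if_pos ⟨List.mem_cons_of_mem _ hmem, hc⟩]
      · rw [if_neg (by intro h; exact hmem h.1), hout1]
        by_cases hk : kki = k
        · rw [if_pos (by rw [← hk]; exact ⟨hkk, hc⟩),
              if_pos ⟨by rw [hk]; exact List.mem_cons_self .., hc⟩]
        · rw [if_neg (by intro h; exact hk (by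
              rw [hkk] at h; exact Option.some_inj.mp h.1)),
            if_neg (by intro h; rcases List.mem_cons.mp h.1 with h' | h'
                       · exact hk h'
                       · exact hmem h')]

lemma pvWriteFold_length (rows : List (List (String × String))) :
    ∀ (l : List (String × List Int)) (out : List (List (String × String))),
      (l.foldl (pvWrite rows) out).length = out.length := by
  intro l
  induction l with
  | nil => intro out; rfl
  | cons p l' ih =>
    intro out
    simp only [List.foldl_cons]
    rw [ih, pvWrite_length]

lemma pvB_length (rows : List (List (String × String))) :
    (dedupe_executive_journey_catalog_py_alt rows).length = rows.length := by
  unfold dedupe_executive_journey_catalog_py_alt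
  exact pvWriteFold_length rows _ rows

lemma pvB_getElem? (rows : List (List (String × String))) (i : Nat) (hi : i < rows.length) :
    (dedupe_executive_journey_catalog_py_alt rows)[i]? =
      some (pvRefStep ((rows.map pvKey).take i) rows[i]) := by
  unfold dedupe_executive_journey_catalog_py_alt
  simp only
  rw [PySem.Dict.items_eq_map_keys _ (pvGroups_nodup rows) [], pvGroups_keys]
  simp only [pvGroups_getD]
  rw [List.foldl_map]
  have hkk : (rows.map pvKey)[i]? = some (pvKey rows[i]) := by
    rw [List.getElem?_map, List.getElem?_eq_getElem hi]; rfl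
  rw [pvB_fold rows _ rows rfl i (pvKey rows[i]) hi hkk]
  have hmem : pvKey rows[i] ∈ PySem.Set.ofList (rows.map pvKey) := by
    rw [PySem.Set.mem_ofList]
    exact List.mem_map_of_mem (List.getElem_mem hi)
  by_cases hc : ((rows.map pvKey).take i).count (pvKey rows[i]) = 0
  · rw [if_neg (by simp [hc]), List.getElem?_eq_getElem hi]
    unfold pvRefStep
    rw [if_pos hc]
  · rw [if_pos ⟨hmem, hc⟩]

-- ===== VERDICT (by name: the statement is the Claim_ definition above) =====
theorem dedupe_executive_journey_catalog_py_spec : Claim_equal_dedupe_executive_journey_catalog_py := by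
  intro rows _
  unfold Spec_dedupe_executive_journey_catalog_py
  have hA : dedupe_executive_journey_catalog_py rows = pvBuild [] rows := by
    unfold dedupe_executive_journey_catalog_py
    rw [pvA_aux rows PySem.Dict.empty [] [] (by intro k; simp [PySem.Dict.getD_empty])]
    simp
  rw [hA]
  apply List.ext_getElem?
  intro i
  by_cases hi : i < rows.length
  · rw [pvBuild_getElem? rows [] i (by simpa [pvBuild_length] using hi), pvB_getElem? rows i hi]
    simp
  · rw [List.getElem?_eq_none (by simp [pvBuild_length]; omega),
        List.getElem?_eq_none (by rw [pvB_length]; omega)]
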